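-- pv_equiv track=rewrite | github.com/swj9707/OnlineJudge | Programmers/2021_WeeklyChallenge/1W.py | solution
-- ===== SOURCE A (Python) =====
-- def solution(price, money, count):
--     answer = -1
--     Amount = 0
--     for i in range(1, count+1):
--         Amount += price * i
--     if Amount - money > 0:
--         answer = Amount - money
--     else:
--         answer = 0
--     return answer
-- ===== SOURCE B (Python) =====
-- def solution(price, money, count):
--     n = count if count > 0 else 0
--     total = price * n * (n + 1) // 2
--     return max(total - money, 0)
-- ===== Notes on version B (the rewrite author's own statement) =====
-- stated objective: faster
-- what changed: Replaces the O(count) accumulation loop with the closed-form arithmetic-series formula price*n*(n+1)//2 and a max with 0.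
import Mathlib
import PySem

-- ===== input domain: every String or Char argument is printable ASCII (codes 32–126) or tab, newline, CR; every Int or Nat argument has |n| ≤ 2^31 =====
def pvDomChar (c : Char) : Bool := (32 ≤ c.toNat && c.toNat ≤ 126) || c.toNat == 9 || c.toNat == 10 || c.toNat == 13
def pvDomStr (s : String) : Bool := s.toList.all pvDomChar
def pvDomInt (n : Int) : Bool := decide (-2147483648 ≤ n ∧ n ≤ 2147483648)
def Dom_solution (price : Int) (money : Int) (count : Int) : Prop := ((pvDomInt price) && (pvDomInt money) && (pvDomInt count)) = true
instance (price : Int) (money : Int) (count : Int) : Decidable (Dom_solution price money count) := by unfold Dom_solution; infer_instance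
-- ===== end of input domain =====

-- B replaces A's O(count) accumulation loop by the closed-form arithmetic-series formula (objective: faster).

-- ===== PORT A =====
-- literal port: answer = -1 is dead state overwritten by the final if/else, kept as the initial value
def solution (price : Int) (money : Int) (count : Int) : Int :=
  let _answer : Int := -1
  let amount : Int := (PySem.List.pyRange 1 (count + 1) 1).foldl (fun a i => a + price * i) 0
  if amount - money > 0 then amount - money else 0

-- ===== PORT B =====
def solution_alt (price : Int) (money : Int) (count : Int) : Int :=
  let n : Int := if count > 0 then count else 0
  let total : Int := PySem.Int.floordiv (price * n * (n + 1)) 2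
  max (total - money) 0

-- ===== PRECONDITION & SPEC =====
def Spec_solution (price : Int) (money : Int) (count : Int) (out : Int) : Prop := out = solution_alt price money count
instance (price : Int) (money : Int) (count : Int) (out : Int) : Decidable (Spec_solution price money count out) := by unfold Spec_solution; infer_instance

-- ===== CLAIM (what is proved, stated in full; the proofs are below) =====
def Claim_equal_solution : Prop := ∀ (price : Int) (money : Int) (count : Int), Dom_solution price money count → Spec_solution price money count (solution price money count)

-- ===== LEMMAS AND PROOFS =====

lemma pv_sum_formula (price : Int) : ∀ (n : Nat),
    2 * ((PySem.List.pyRange 1 ((n : Int) + 1) 1).foldl (fun a i => a + price * i) 0)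
      = price * n * (n + 1) := by
  intro n
  induction n with
  | zero => simp [PySem.List.pyRange_one_eq_nil]
  | succ m ih =>
      have h : ((m + 1 : Nat) : Int) + 1 = ((m : Int) + 1) + 1 := by push_cast; ring
      rw [h, PySem.List.pyRange_one_succ_right (by omega), List.foldl_append]
      simp only [List.foldl_cons, List.foldl_nil]
      push_cast
      linear_combination ih

lemma pv_floordiv_even (q : Int) : PySem.Int.floordiv (2 * q) 2 = q := by
  rw [PySem.Int.floordiv_eq_iff_of_pos (by norm_num)]
  omega

lemma pv_amount_eq (price count : Int) :
    (PySem.List.pyRange 1 (count + 1) 1).foldl (fun a i => a + price * i) 0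
      = PySem.Int.floordiv (price * (if count > 0 then count else 0) * ((if count > 0 then count else 0) + 1)) 2 := by
  by_cases hc : count > 0
  · rw [if_pos hc]
    have hcn : count = ((count.toNat : Int)) := by omega
    rw [hcn]
    have h := pv_sum_formula price count.toNat
    rw [show price * (count.toNat : Int) * ((count.toNat : Int) + 1)
          = 2 * ((PySem.List.pyRange 1 ((count.toNat : Int) + 1) 1).foldl (fun a i => a + price * i) 0) from h.symm,
        pv_floordiv_even]
  · rw [if_neg hc, PySem.List.pyRange_one_eq_nil (by omega), List.foldl_nil,
        show price * 0 * (0 + 1) = 2 * 0 from by ring, pv_floordiv_even]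

-- ===== VERDICT (by name: the statement is the Claim_ definition above) =====
theorem solution_spec : Claim_equal_solution := by
  intro price money count _
  unfold Spec_solution solution solution_alt
  simp only []
  rw [pv_amount_eq price count]
  omega
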